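-- pv_equiv track=rewrite | github.com/AntoineWauthier/Chemical_balance | main.py | combinaisons
-- ===== SOURCE A (Python) =====
-- def combinaisons(l,p): #creer toutes les combinaisons possibles d'element de l et de longueur p
--     n=len(l)
--     composantes=[]
--     nb = n**p
--     for k in range(1,p+1):
--         aux=[]
--         for u in range(n):
--             aux += (  (n**(p-k))*[l[u]]  )          #c'est un kdo de romain, la flemme de comprendre, faut que je l'adapte de toute fa??on
--         aux=(n**(k-1))*aux
--         composantes.append(aux)
--     aux_f=[]
--     for k in range(nb):
--         aux2 = []
--         for i in range(p):
--             aux2.append(composantes[i][k])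
--         aux_f.append(aux2)
--     return(aux_f)
-- ===== SOURCE B (Python) =====
-- def combinaisons(l, p):
--     result = [[]]
--     for _ in range(p):
--         result = [prefix + [x] for prefix in result for x in l]
--     return result
-- ===== Notes on version B (the rewrite author's own statement) =====
-- stated objective: simpler
-- what changed: B builds the Cartesian product incrementally (result = [prefix+[x] ...] repeated p times) instead of A's mixed-radix column construction followed by an index-by-index transpose.
import Mathlib
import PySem

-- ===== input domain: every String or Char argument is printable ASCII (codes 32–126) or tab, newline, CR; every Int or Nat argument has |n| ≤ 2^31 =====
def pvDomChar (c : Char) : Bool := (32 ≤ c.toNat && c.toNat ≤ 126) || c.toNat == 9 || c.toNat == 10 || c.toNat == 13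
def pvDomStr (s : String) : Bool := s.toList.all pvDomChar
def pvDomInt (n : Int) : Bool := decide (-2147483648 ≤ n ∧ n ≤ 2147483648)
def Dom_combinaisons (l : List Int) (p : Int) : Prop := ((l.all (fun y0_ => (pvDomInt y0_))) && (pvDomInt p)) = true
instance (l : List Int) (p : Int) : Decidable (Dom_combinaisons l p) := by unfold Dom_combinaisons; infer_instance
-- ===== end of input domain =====

-- B builds the Cartesian product incrementally (extend every prefix by every element, p times)
-- instead of A's mixed-radix column construction followed by an index-by-index transpose; objective: simpler.

-- ===== PORT A =====
-- Literal port of A. n**e for 0 ≤ e is ported as Nat-power of l.length (n = len(l) ≥ 0, exact);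
-- the always-in-range Python indexings l[u] and composantes[i][k] are ported with pyGetD (exact in range).
def combinaisons (l : List Int) (p : Int) : List (List Int) :=
  let n : Int := (l.length : Int)
  let nb : Int := ((l.length ^ p.toNat : Nat) : Int)      -- n**p (Pre_ gives 0 ≤ p)
  let composantes : List (List Int) :=
    (PySem.List.pyRange 1 (p+1) 1).foldl (fun comp k =>
      let aux : List Int :=
        (PySem.List.pyRange 0 n 1).foldl (fun aux u =>
          aux ++ List.replicate (l.length ^ (p - k).toNat) (PySem.List.pyGetD l u 0)) []
      let aux2 : List Int := (List.replicate (l.length ^ (k - 1).toNat) aux).flatten  -- (n**(k-1))*aux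
      comp ++ [aux2]) []
  (PySem.List.pyRange 0 nb 1).foldl (fun auxF k =>
    auxF ++ [(PySem.List.pyRange 0 p 1).foldl (fun aux2 i =>
      aux2 ++ [PySem.List.pyGetD (PySem.List.pyGetD composantes i []) k 0]) []]) []

-- ===== PORT B =====
-- Literal port of B: result = [[]]; for _ in range(p): result = [pre + [x] for pre in result for x in l].
def combinaisons_alt (l : List Int) (p : Int) : List (List Int) :=
  (PySem.List.pyRange 0 p 1).foldl
    (fun result _ => result.flatMap (fun pre => l.map (fun x => pre ++ [x])))
    [[]]

-- ===== PRECONDITION & SPEC =====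
-- Pre_ excludes exactly the inputs where Python A raises: p < 0 (ZeroDivisionError for empty l,
-- else TypeError: range() applied to the float n**p), and p ≥ 1 with the list-repetition count
-- n**(p-1) > sys.maxsize = 2^63-1, where CPython's sequence repetition raises OverflowError.
def Pre_combinaisons (l : List Int) (p : Int) : Prop :=
  0 ≤ p ∧ (p = 0 ∨ l.length ^ (p.toNat - 1) ≤ 9223372036854775807)
instance (l : List Int) (p : Int) : Decidable (Pre_combinaisons l p) := by unfold Pre_combinaisons; infer_instance
def pvWitness_combinaisons : List Int × Int := ([1, 2], 2)

def Spec_combinaisons (l : List Int) (p : Int) (out : List (List Int)) : Prop := out = combinaisons_alt l p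
instance (l : List Int) (p : Int) (out : List (List Int)) : Decidable (Spec_combinaisons l p out) := by unfold Spec_combinaisons; infer_instance

-- ===== CLAIM (what is proved, stated in full; the proofs are below) =====
def Claim_equal_combinaisons : Prop := ∀ (l : List Int) (p : Int), Dom_combinaisons l p → Pre_combinaisons l p → Spec_combinaisons l p (combinaisons l p)

-- ===== LEMMAS AND PROOFS =====

-- the j-th tuple (0-indexed, last coordinate fastest) of the product of k copies of l
def pvTup (l : List Int) (k : Nat) (j : Nat) : List Int :=
  (List.range k).map (fun i => l.getD (j / l.length ^ (k - 1 - i) % l.length) 0)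

-- closed form both programs are proved equal to
def pvF (l : List Int) (k : Nat) : List (List Int) :=
  (List.range (l.length ^ k)).map (pvTup l k)

theorem pv_range_mul_flatMap {α : Type} (a b : Nat) (g : Nat → α) :
    (List.range (a * b)).map g
      = (List.range a).flatMap (fun q => (List.range b).map (fun r => g (q * b + r))) := by
  induction a with
  | zero => simp
  | succ a ih =>
    have : (a + 1) * b = a * b + b := by ring
    rw [this, List.range_add, List.map_append, ih, List.range_succ, List.flatMap_append]
    simp [List.map_map, Function.comp, Nat.add_comm]

theorem pv_tup_zero (l : List Int) (j : Nat) : pvTup l 0 j = [] := by simp [pvTup]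

theorem pv_tup_succ (l : List Int) (k q r : Nat) (hr : r < l.length) :
    pvTup l (k + 1) (q * l.length + r) = pvTup l k q ++ [l.getD r 0] := by
  have hn : 0 < l.length := lt_of_le_of_lt (Nat.zero_le r) hr
  unfold pvTup
  rw [List.range_succ, List.map_append]
  congr 1
  · apply List.map_congr_left
    intro i hi
    have hik : i < k := List.mem_range.mp hi
    have he : k + 1 - 1 - i = (k - 1 - i) + 1 := by omega
    rw [he, pow_succ]
    have hdiv : (q * l.length + r) / (l.length ^ (k - 1 - i) * l.length)
        = q / l.length ^ (k - 1 - i) := by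
      rw [Nat.mul_comm (l.length ^ (k - 1 - i)) l.length, ← Nat.div_div_eq_div_mul,
        Nat.mul_comm q l.length, Nat.mul_add_div hn]
      simp [Nat.div_eq_of_lt hr]
    rw [hdiv]
  · simp [Nat.mod_eq_of_lt hr]

theorem pv_F_zero (l : List Int) : pvF l 0 = [[]] := by simp [pvF, pv_tup_zero]

theorem pv_F_succ (l : List Int) (k : Nat) :
    pvF l (k + 1) = (pvF l k).flatMap (fun pre => l.map (fun x => pre ++ [x])) := by
  unfold pvF
  rw [pow_succ, pv_range_mul_flatMap, List.flatMap_map]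
  apply List.flatMap_congr
  intro q _
  apply List.ext_getElem
  · simp
  · intro r h1 h2
    simp only [List.getElem_map, List.getElem_range]
    rw [pv_tup_succ l k q r (by simpa using h1),
      List.getD_eq_getElem l 0 (by simpa using h1)]


theorem pv_iter_eq_F (l : List Int) (m : Nat) :
    (fun res : List (List Int) => res.flatMap (fun pre => l.map (fun x => pre ++ [x])))^[m] [[]]
      = pvF l m := by
  induction m with
  | zero => simp [pv_F_zero]
  | succ m ih => rw [Function.iterate_succ_apply', ih, pv_F_succ]

theorem pv_alt_eq (l : List Int) (p : Int) :
    combinaisons_alt l p = pvF l p.toNat := by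
  unfold combinaisons_alt
  rw [List.foldl_const, PySem.List.length_pyRange_one]
  simpa using pv_iter_eq_F l p.toNat

theorem pv_flatMap_replicate_length (f : Nat → Int) (n m : Nat) :
    ((List.range n).flatMap (fun u => List.replicate m (f u))).length = n * m := by
  simp [List.length_flatMap]

theorem pv_flatMap_replicate_getD (f : Nat → Int) (n m j : Nat) (hj : j < n * m) :
    ((List.range n).flatMap (fun u => List.replicate m (f u))).getD j 0 = f (j / m) := by
  induction n with
  | zero => omega
  | succ n ih =>
    rw [List.range_succ, List.flatMap_append]
    have hdist : (n + 1) * m = n * m + m := by ring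
    by_cases h : j < n * m
    · rw [List.getD_append _ _ _ _ (by rw [pv_flatMap_replicate_length]; exact h), ih h]
    · rw [List.getD_append_right _ _ _ _ (by rw [pv_flatMap_replicate_length]; omega),
        pv_flatMap_replicate_length]
      simp only [List.flatMap_cons, List.flatMap_nil, List.append_nil]
      rw [List.getD_replicate _ (show j - n * m < m by omega),
        Nat.div_eq_of_lt_le (show n * m ≤ j by omega) (show j < (n + 1) * m from hj)]

theorem pv_flatten_replicate_getD (b : List Int) (r j : Nat) (hj : j < r * b.length) :
    ((List.replicate r b).flatten).getD j 0 = b.getD (j % b.length) 0 := by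
  induction r generalizing j with
  | zero => omega
  | succ r ih =>
    rw [List.replicate_succ, List.flatten_cons]
    have hdist : (r + 1) * b.length = r * b.length + b.length := by ring
    by_cases h : j < b.length
    · rw [List.getD_append _ _ _ _ h, Nat.mod_eq_of_lt h]
    · rw [List.getD_append_right _ _ _ _ (by omega), ih _ (by omega)]
      conv_rhs => rw [Nat.mod_eq_sub_mod (by omega : b.length ≤ j)]

-- the column A builds for loop index k (1 ≤ k ≤ p): n**(k-1) copies of the block
-- [l[0]]*n^(p-k) ++ [l[1]]*n^(p-k) ++ …
def pvCol (l : List Int) (p k : Int) : List Int :=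
  (List.replicate (l.length ^ (k - 1).toNat)
    ((List.range l.length).flatMap
      (fun u => List.replicate (l.length ^ (p - k).toNat) (l.getD u 0)))).flatten

theorem pv_col_getD (l : List Int) (p k : Int) (j : Nat)
    (hk1 : 1 ≤ k) (hk2 : k ≤ p) (hj : j < l.length ^ p.toNat) :
    (pvCol l p k).getD j 0 = l.getD (j / l.length ^ (p - k).toNat % l.length) 0 := by
  set n := l.length with hn
  set m := n ^ (p - k).toNat with hm
  set r := n ^ (k - 1).toNat with hr
  have hsplit : r * (n * m) = n ^ p.toNat := by
    rw [hm, hr, ← pow_succ', ← pow_add]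
    congr 1
    omega
  have hlen : ((List.range n).flatMap (fun u => List.replicate m (l.getD u 0))).length = n * m :=
    pv_flatMap_replicate_length _ n m
  have hj' : j < r * ((List.range n).flatMap (fun u => List.replicate m (l.getD u 0))).length := by
    rw [hlen]
    calc j < n ^ p.toNat := hj
    _ = r * (n * m) := hsplit.symm
  unfold pvCol
  rw [pv_flatten_replicate_getD _ _ _ hj', hlen]
  have hnm : 0 < n * m := by
    rcases Nat.eq_zero_or_pos (n * m) with h | h
    · exfalso
      have h0 : r * (n * m) = 0 := by rw [h, Nat.mul_zero]
      omega
    · exact h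
  rw [pv_flatMap_replicate_getD _ _ _ _ (Nat.mod_lt j hnm),
    show n * m = m * n from Nat.mul_comm n m, Nat.mod_mul_right_div_self]

theorem pv_A_eq (l : List Int) (p : Int) (hp : 0 ≤ p) :
    combinaisons l p = pvF l p.toNat := by
  unfold combinaisons
  simp only [PySem.List.foldl_append_singleton_eq_map]
  simp only [PySem.List.foldl_append_eq_flatMap]
  simp only [List.nil_append]
  have hcomp : (PySem.List.pyRange 1 (p + 1) 1).map (fun k =>
        (List.replicate (l.length ^ (k - 1).toNat)
          ((PySem.List.pyRange 0 (l.length : Int) 1).flatMap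
            (fun u => List.replicate (l.length ^ (p - k).toNat) (PySem.List.pyGetD l u 0)))).flatten)
      = (List.range p.toNat).map (fun i : Nat => pvCol l p (1 + (i : Int))) := by
    rw [PySem.List.pyRange_one 1 (p + 1), List.map_map,
      show p + 1 - 1 = p from by ring]
    apply List.map_congr_left
    intro i _
    simp only [Function.comp]
    unfold pvCol
    congr 2
    rw [PySem.List.pyRange_zero_nat l.length, List.flatMap_map]
    apply List.flatMap_congr
    intro u _
    rw [PySem.List.pyGetD_natCast]
  rw [hcomp, PySem.List.pyRange_zero_nat (l.length ^ p.toNat), List.map_map]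
  unfold pvF
  apply List.map_congr_left
  intro j hj
  have hjlt : j < l.length ^ p.toNat := List.mem_range.mp hj
  simp only [Function.comp]
  rw [PySem.List.pyRange_zero p, List.map_map]
  unfold pvTup
  apply List.map_congr_left
  intro i hi
  have hilt : i < p.toNat := List.mem_range.mp hi
  simp only [Function.comp]
  rw [PySem.List.pyGetD_natCast, PySem.List.pyGetD_natCast,
    PySem.List.getD_map_range _ _ _ _ hilt, pv_col_getD l p (1 + (i : Int)) j (by omega) (by omega) hjlt,
    show (p - (1 + (i : Int))).toNat = p.toNat - 1 - i by omega]

-- ===== VERDICT (by name: the statement is the Claim_ definition above) =====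
theorem combinaisons_spec : Claim_equal_combinaisons := by
  intro l p _ hp
  unfold Spec_combinaisons
  rw [pv_A_eq l p hp.1, pv_alt_eq l p]
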